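-- pv_equiv track=rewrite | github.com/pypi-data/pypi-mirror-271 | packages/opencti-excel-uploader/opencti_excel_uploader-1.1.0.tar.gz/opencti_excel_uploader-1.1.0/opencti_excel_uploader/xlsx_utils.py | drop_duplicates
-- ===== SOURCE A (Python) =====
-- def drop_duplicates(list_of_dicts):
--     """Drops duplicates from a list of dictionaries"""
--     unique_dicts = []
--     # duplicates = []
--
--     for d in list_of_dicts:
--         if d and isinstance(d, dict):
--             str_items = [item for item in d.values() if isinstance(item, str)]
--             found_duplicate = False
--
--             for existing_dict in unique_dicts:
--                 if all(item in existing_dict.values() for item in str_items):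
--                     found_duplicate = True
--                     break
--
--             if not found_duplicate:
--                 unique_dicts.append(d)
--
--     return unique_dicts
-- ===== SOURCE B (Python) =====
-- def drop_duplicates(list_of_dicts):
--     """Drops duplicates from a list of dictionaries (inverted-index reimplementation)"""
--     unique_dicts = []
--     index = {}  # string value -> set of indices of kept dicts containing it
--
--     for d in list_of_dicts:
--         if d and isinstance(d, dict):
--             vals = [v for v in d.values() if isinstance(v, str)]
--             if not vals:
--                 dup = bool(unique_dicts)
--             else:
--                 cands = index.get(vals[0], set())
--                 for v in vals[1:]:
--                     cands = cands & index.get(v, set())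
--                 dup = bool(cands)
--             if not dup:
--                 i = len(unique_dicts)
--                 unique_dicts.append(d)
--                 for v in vals:
--                     index.setdefault(v, set()).add(i)
--
--     return unique_dicts
-- ===== Notes on version B (the rewrite author's own statement) =====
-- stated objective: faster
-- what changed: Replaces the inner scan over all kept dicts by an incrementally maintained inverted index from each string value to the set of indices of kept dicts containing it; a new dict is a duplicate iff the intersection of the index sets of its values is non-empty (or, if it has no string values, iff some dict was already kept).
import Mathlib
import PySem

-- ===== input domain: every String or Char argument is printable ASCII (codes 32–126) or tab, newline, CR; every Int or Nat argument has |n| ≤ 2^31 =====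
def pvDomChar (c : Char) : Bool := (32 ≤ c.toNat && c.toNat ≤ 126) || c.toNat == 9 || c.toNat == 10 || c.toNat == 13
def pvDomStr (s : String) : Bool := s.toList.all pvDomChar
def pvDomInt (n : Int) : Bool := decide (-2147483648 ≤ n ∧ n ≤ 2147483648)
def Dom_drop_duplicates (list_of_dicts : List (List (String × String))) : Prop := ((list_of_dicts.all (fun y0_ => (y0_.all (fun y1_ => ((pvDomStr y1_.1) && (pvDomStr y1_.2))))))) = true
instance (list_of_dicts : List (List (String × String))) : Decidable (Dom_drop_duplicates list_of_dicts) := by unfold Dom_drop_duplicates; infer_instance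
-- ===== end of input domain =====

-- B replaces A's quadratic scan of the kept dicts by an inverted index (string value -> set of
-- indices of kept dicts containing it); duplicate test = intersection of index sets (objective: faster).

-- ===== PORT A =====
-- values of the Python dict represented by the association list (duplicate keys: later wins)
def pvVals (d : List (String × String)) : List String := (PySem.Dict.ofList d).values

def pvDupA (uniq : List (List (String × String))) (strItems : List String) : Bool :=
  uniq.any (fun e => strItems.all (fun it => (pvVals e).contains it))

def pvStepA (uniq : List (List (String × String))) (d : List (String × String)) :
    List (List (String × String)) :=
  if d.isEmpty then uniq
  else if pvDupA uniq (pvVals d) then uniq else uniq ++ [d]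

def drop_duplicates (list_of_dicts : List (List (String × String))) : List (List (String × String)) :=
  list_of_dicts.foldl pvStepA []

-- ===== PORT B =====
-- candidates = index[vals[0]] & index[v] for v in vals[1:]
def pvCands (index : PySem.Dict String (List Nat)) (v0 : String) (rest : List String) : List Nat :=
  rest.foldl (fun c v => c.filter (fun i => (index.getD v []).contains i)) (index.getD v0 [])

def pvDupB (uniq : List (List (String × String))) (index : PySem.Dict String (List Nat))
    (vals : List String) : Bool :=
  match vals with
  | [] => !uniq.isEmpty
  | v0 :: rest => !(pvCands index v0 rest).isEmpty

-- index.setdefault(v, set()).add(n) for each v in vals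
def pvAddIdx (index : PySem.Dict String (List Nat)) (n : Nat) (vals : List String) :
    PySem.Dict String (List Nat) :=
  vals.foldl (fun idx v => idx.insert v (PySem.Set.add (idx.getD v []) n)) index

def pvStepB (st : List (List (String × String)) × PySem.Dict String (List Nat))
    (d : List (String × String)) :
    List (List (String × String)) × PySem.Dict String (List Nat) :=
  if d.isEmpty then st
  else
    let vals := pvVals d
    if pvDupB st.1 st.2 vals then st
    else (st.1 ++ [d], pvAddIdx st.2 st.1.length vals)

def drop_duplicates_alt (list_of_dicts : List (List (String × String))) : List (List (String × String)) :=
  (list_of_dicts.foldl pvStepB ([], PySem.Dict.empty)).1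

-- ===== PRECONDITION & SPEC =====
def Spec_drop_duplicates (list_of_dicts : List (List (String × String))) (out : List (List (String × String))) : Prop := out = drop_duplicates_alt list_of_dicts
instance (list_of_dicts : List (List (String × String))) (out : List (List (String × String))) : Decidable (Spec_drop_duplicates list_of_dicts out) := by unfold Spec_drop_duplicates; infer_instance

-- ===== CLAIM (what is proved, stated in full; the proofs are below) =====
def Claim_equal_drop_duplicates : Prop := ∀ (list_of_dicts : List (List (String × String))), Dom_drop_duplicates list_of_dicts → Spec_drop_duplicates list_of_dicts (drop_duplicates list_of_dicts)

-- ===== LEMMAS AND PROOFS =====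

-- the index invariant: index.getD v [] holds exactly the indices of kept dicts whose values contain v
def pvInv (uniq : List (List (String × String))) (index : PySem.Dict String (List Nat)) : Prop :=
  ∀ (v : String) (i : Nat), i ∈ index.getD v [] ↔ ∃ e, uniq[i]? = some e ∧ v ∈ pvVals e

lemma pv_cands_aux (index : PySem.Dict String (List Nat)) (rest : List String) (c0 : List Nat)
    (i : Nat) : i ∈ rest.foldl (fun c v => c.filter (fun i => (index.getD v []).contains i)) c0 ↔
      i ∈ c0 ∧ ∀ v ∈ rest, i ∈ index.getD v [] := by
  induction rest generalizing c0 with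
  | nil => simp
  | cons w ws ih =>
    simp only [List.foldl_cons, ih, List.mem_filter, List.mem_cons]
    constructor
    · rintro ⟨⟨h1, h2⟩, h3⟩
      refine ⟨h1, ?_⟩
      rintro v (rfl | hv)
      · simpa using h2
      · exact h3 v hv
    · rintro ⟨h1, h2⟩
      exact ⟨⟨h1, by simpa using h2 w (Or.inl rfl)⟩, fun v hv => h2 v (Or.inr hv)⟩

lemma pv_mem_cands (index : PySem.Dict String (List Nat)) (v0 : String) (rest : List String)
    (i : Nat) : i ∈ pvCands index v0 rest ↔
      i ∈ index.getD v0 [] ∧ ∀ v ∈ rest, i ∈ index.getD v [] := pv_cands_aux index rest _ i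

lemma pv_dup_eq (uniq : List (List (String × String))) (index : PySem.Dict String (List Nat))
    (vals : List String) (hInv : pvInv uniq index) :
    pvDupB uniq index vals = pvDupA uniq vals := by
  cases vals with
  | nil => cases uniq <;> simp [pvDupB, pvDupA]
  | cons v0 rest =>
    rw [Bool.eq_iff_iff]
    simp only [pvDupB, pvDupA, Bool.not_eq_eq_eq_not, Bool.not_true, List.isEmpty_eq_false_iff,
      List.any_eq_true, List.all_eq_true, List.contains_iff_mem, List.mem_cons]
    constructor
    · intro hne
      obtain ⟨i, hi⟩ := List.exists_mem_of_ne_nil _ hne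
      rw [pv_mem_cands] at hi
      obtain ⟨h0, hrest⟩ := hi
      obtain ⟨e, he, hv0⟩ := (hInv v0 i).mp h0
      refine ⟨e, List.mem_of_getElem? he, ?_⟩
      rintro v (rfl | hv)
      · exact hv0
      · obtain ⟨e', he', hv'⟩ := (hInv v i).mp (hrest v hv)
        rw [he] at he'
        exact (Option.some_injective _ he') ▸ hv'
    · rintro ⟨e, hmem, hall⟩
      obtain ⟨i, hi⟩ := List.mem_iff_getElem?.mp hmem
      have hc : i ∈ pvCands index v0 rest := by
        rw [pv_mem_cands]
        exact ⟨(hInv v0 i).mpr ⟨e, hi, hall v0 (Or.inl rfl)⟩,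
          fun v hv => (hInv v i).mpr ⟨e, hi, hall v (Or.inr hv)⟩⟩
      exact List.ne_nil_of_mem hc

lemma pv_mem_addIdx (vals : List String) (index : PySem.Dict String (List Nat)) (n : Nat)
    (v : String) (i : Nat) :
    i ∈ (pvAddIdx index n vals).getD v [] ↔ i ∈ index.getD v [] ∨ (v ∈ vals ∧ i = n) := by
  induction vals generalizing index with
  | nil => simp [pvAddIdx]
  | cons w ws ih =>
    simp only [pvAddIdx, List.foldl_cons] at *
    rw [ih]
    rw [PySem.Dict.getD_insert]
    by_cases hvw : v = w
    · subst hvw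
      simp [PySem.Set.mem_add]
      tauto
    · simp [hvw, List.mem_cons]

lemma pv_inv_step (uniq : List (List (String × String))) (index : PySem.Dict String (List Nat))
    (d : List (String × String)) (hInv : pvInv uniq index) :
    pvInv (uniq ++ [d]) (pvAddIdx index uniq.length (pvVals d)) := by
  intro v i
  rw [pv_mem_addIdx, hInv v i]
  constructor
  · rintro (⟨e, he, hv⟩ | ⟨hv, rfl⟩)
    · have hlt : i < uniq.length := (List.getElem?_eq_some_iff.mp he).choose
      exact ⟨e, by rw [List.getElem?_append_left hlt]; exact he, hv⟩
    · exact ⟨d, by simp, hv⟩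
  · rintro ⟨e, he, hv⟩
    by_cases hlt : i < uniq.length
    · rw [List.getElem?_append_left hlt] at he
      exact Or.inl ⟨e, he, hv⟩
    · have hle : uniq.length ≤ i := Nat.le_of_not_lt hlt
      rw [List.getElem?_append_right hle] at he
      have hi1 : i - uniq.length < 1 := by
        by_contra hge
        rw [List.getElem?_eq_none (by simpa using Nat.le_of_not_lt hge)] at he
        simp at he
      have : i = uniq.length := by omega
      subst this
      simp at he
      exact Or.inr ⟨he ▸ hv, rfl⟩

lemma pv_fold_eq (xs : List (List (String × String))) (uniq : List (List (String × String)))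
    (index : PySem.Dict String (List Nat)) (hInv : pvInv uniq index) :
    xs.foldl pvStepA uniq = (xs.foldl pvStepB (uniq, index)).1 := by
  induction xs generalizing uniq index with
  | nil => rfl
  | cons d ds ih =>
    simp only [List.foldl_cons, pvStepA, pvStepB]
    by_cases hd : d.isEmpty
    · simp only [hd, if_true]
      exact ih uniq index hInv
    · simp only [hd, pv_dup_eq uniq index (pvVals d) hInv]
      by_cases hdup : pvDupA uniq (pvVals d)
      · simp only [hdup, if_true]
        exact ih uniq index hInv
      · simp only [hdup]
        exact ih (uniq ++ [d]) (pvAddIdx index uniq.length (pvVals d)) (pv_inv_step uniq index d hInv)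

-- ===== VERDICT (by name: the statement is the Claim_ definition above) =====
theorem drop_duplicates_spec : Claim_equal_drop_duplicates := by
  intro xs _
  unfold Spec_drop_duplicates drop_duplicates drop_duplicates_alt
  refine pv_fold_eq xs [] PySem.Dict.empty ?_
  intro v i
  simp [PySem.Dict.getD_empty]
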